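-- pv_equiv track=rewrite | github.com/Brandjuh/FireAndRescueAcademyCogs | mc_roulette/roulette.py | _is_perfect_call
-- ===== SOURCE A (Python) =====
-- def _is_perfect_call(req: dict, alloc: dict) -> bool:
--     for r, need in req.items():
--         if int(alloc.get(r, 0)) != int(need):
--             return False
--     for r, got in alloc.items():
--         if r not in req and int(got) > 0:
--             return False
--         if r in req and int(got) > int(req[r]):
--             return False
--     return True
-- ===== SOURCE B (Python) =====
-- def _is_perfect_call(req: dict, alloc: dict) -> bool:
--     # Consume a working copy of alloc: pop each required key and compare,
--     # then every allocation left over must be non-positive.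
--     remaining = dict(alloc)
--     for r, need in req.items():
--         if int(remaining.pop(r, 0)) != int(need):
--             return False
--     return all(int(v) <= 0 for v in remaining.values())
-- ===== Notes on version B (the rewrite author's own statement) =====
-- stated objective: alternative
-- what changed: A makes two read-only passes (check every required key against alloc, then police every allocated key with membership tests into req); B instead destructively consumes a working copy of alloc, popping each required key off while comparing, and finally checks that every leftover allocation is non-positive.
import Mathlib
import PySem

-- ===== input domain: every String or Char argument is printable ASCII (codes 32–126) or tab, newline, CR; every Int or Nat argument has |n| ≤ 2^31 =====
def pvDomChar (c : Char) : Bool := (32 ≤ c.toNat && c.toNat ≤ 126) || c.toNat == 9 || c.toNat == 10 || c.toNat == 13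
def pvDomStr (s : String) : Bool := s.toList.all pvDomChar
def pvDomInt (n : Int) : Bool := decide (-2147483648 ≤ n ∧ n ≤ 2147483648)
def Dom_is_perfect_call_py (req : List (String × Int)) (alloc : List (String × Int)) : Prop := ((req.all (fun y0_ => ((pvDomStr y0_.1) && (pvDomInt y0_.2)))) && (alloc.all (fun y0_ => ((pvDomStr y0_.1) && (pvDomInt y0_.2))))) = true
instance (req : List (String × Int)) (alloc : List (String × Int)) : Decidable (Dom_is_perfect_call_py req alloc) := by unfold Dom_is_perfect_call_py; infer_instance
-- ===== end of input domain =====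

-- B replaces A's two read-only passes by a destructive algorithm: pop each required key
-- off a working copy of alloc while comparing, then check every leftover value is ≤ 0;
-- objective: alternative (same cost, different state maintained).

-- ===== PORT A =====
-- first loop: 'for r, need in req.items(): if int(alloc.get(r, 0)) != int(need): return False'
-- (values are ints, so int(...) is the identity)
def pvReqLoop (alloc : PySem.Dict String Int) : List (String × Int) → Bool
  | [] => true
  | (r, need) :: rest =>
    if alloc.getD r 0 ≠ need then false else pvReqLoop alloc rest

-- second loop: 'for r, got in alloc.items(): …'; 'req[r]' is guarded by 'r in req',
-- so the total lookup 'req.getD r 0' is exact there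
def pvAllocLoop (req : PySem.Dict String Int) : List (String × Int) → Bool
  | [] => true
  | (r, got) :: rest =>
    if req.contains r = false ∧ got > 0 then false
    else if req.contains r = true ∧ got > req.getD r 0 then false
    else pvAllocLoop req rest

def is_perfect_call_py (req : List (String × Int)) (alloc : List (String × Int)) : Bool :=
  pvReqLoop (PySem.Dict.mk alloc) req && pvAllocLoop (PySem.Dict.mk req) alloc

-- ===== PORT B =====
-- 'for r, need in req.items(): if int(remaining.pop(r, 0)) != int(need): return False'
-- carried state is the shrinking dict 'remaining'; pop(r, 0) = lookup with default 0, then erase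
def pvPopLoop : PySem.Dict String Int → List (String × Int) → Option (PySem.Dict String Int)
  | d, [] => some d
  | d, (r, need) :: rest =>
    if d.getD r 0 ≠ need then none else pvPopLoop (d.erase r) rest

-- 'return all(int(v) <= 0 for v in remaining.values())'
def is_perfect_call_py_alt (req : List (String × Int)) (alloc : List (String × Int)) : Bool :=
  match pvPopLoop (PySem.Dict.mk alloc) req with
  | none => false
  | some remaining => remaining.values.all (fun v => decide (v ≤ 0))

-- ===== PRECONDITION & SPEC =====
-- Pre_ excludes association lists with duplicate keys: the Python arguments are dicts, whose
-- keys are necessarily distinct, so a duplicate-keyed list corresponds to no actual call of A.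
def Pre_is_perfect_call_py (req : List (String × Int)) (alloc : List (String × Int)) : Prop :=
  (req.map Prod.fst).Nodup ∧ (alloc.map Prod.fst).Nodup
instance (req : List (String × Int)) (alloc : List (String × Int)) : Decidable (Pre_is_perfect_call_py req alloc) := by unfold Pre_is_perfect_call_py; infer_instance

def pvWitness_is_perfect_call_py : (List (String × Int)) × (List (String × Int)) :=
  ([("engine", 2)], [("engine", 2), ("ladder", 0)])

def Spec_is_perfect_call_py (req : List (String × Int)) (alloc : List (String × Int)) (out : Bool) : Prop := out = is_perfect_call_py_alt req alloc
instance (req : List (String × Int)) (alloc : List (String × Int)) (out : Bool) : Decidable (Spec_is_perfect_call_py req alloc out) := by unfold Spec_is_perfect_call_py; infer_instance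

-- ===== CLAIM (what is proved, stated in full; the proofs are below) =====
def Claim_equal_is_perfect_call_py : Prop := ∀ (req : List (String × Int)) (alloc : List (String × Int)), Dom_is_perfect_call_py req alloc → Pre_is_perfect_call_py req alloc → Spec_is_perfect_call_py req alloc (is_perfect_call_py req alloc)

-- ===== LEMMAS AND PROOFS =====

theorem pvReqLoop_iff (d : PySem.Dict String Int) (l : List (String × Int)) :
    pvReqLoop d l = true ↔ ∀ p ∈ l, d.getD p.1 0 = p.2 := by
  induction l with
  | nil => simp [pvReqLoop]
  | cons p rest ih =>
    obtain ⟨r, need⟩ := p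
    by_cases h : d.getD r 0 = need
    · simp [pvReqLoop, h, ih]
    · simp [pvReqLoop, h]

theorem pvAllocLoop_iff (d : PySem.Dict String Int) (l : List (String × Int)) :
    pvAllocLoop d l = true ↔
      ∀ p ∈ l, (d.contains p.1 = false → p.2 ≤ 0) ∧
               (d.contains p.1 = true → p.2 ≤ d.getD p.1 0) := by
  induction l with
  | nil => simp [pvAllocLoop]
  | cons p rest ih =>
    obtain ⟨r, got⟩ := p
    simp only [pvAllocLoop, List.mem_cons]
    split_ifs with h1 h2
    · constructor
      · intro h; exact absurd h (by simp)
      · intro hall; exfalso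
        have h' : got ≤ 0 := (hall (r, got) (Or.inl rfl)).1 h1.1
        omega
    · constructor
      · intro h; exact absurd h (by simp)
      · intro hall; exfalso
        have h' : got ≤ d.getD r 0 := (hall (r, got) (Or.inl rfl)).2 h2.1
        omega
    · rw [ih]
      constructor
      · rintro hrest p (rfl | hp)
        · dsimp only
          refine ⟨fun hcf => ?_, fun hct => ?_⟩
          · by_contra hgt; exact h1 ⟨hcf, by omega⟩
          · by_contra hgt; exact h2 ⟨hct, by omega⟩
        · exact hrest p hp
      · intro hall p hp; exact hall p (Or.inr hp)

theorem pv_contains_mk (l : List (String × Int)) (r : String) :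
    (PySem.Dict.mk l).contains r = true ↔ r ∈ l.map Prod.fst :=
  PySem.Dict.contains_iff_mem_keys (PySem.Dict.mk l) r

theorem pv_getD_mk (l : List (String × Int)) (h : (l.map Prod.fst).Nodup)
    {r : String} {v : Int} (hm : (r, v) ∈ l) : (PySem.Dict.mk l).getD r 0 = v :=
  PySem.Dict.getD_of_mem_items (PySem.Dict.mk l) hm h 0

theorem pv_get?_erase_of_ne (d : PySem.Dict String Int) {k k' : String} (h : k' ≠ k) :
    (d.erase k).get? k' = d.get? k' := by
  obtain ⟨items⟩ := d
  simp only [PySem.Dict.erase, PySem.Dict.get?]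
  induction items with
  | nil => rfl
  | cons p rest ih =>
    rw [List.filter_cons]
    by_cases hk : p.1 = k
    · rw [if_neg (by simp [hk]), List.find?_cons_of_neg (by simp [hk, Ne.symm h]), ih]
    · rw [if_pos (by simp [hk])]
      by_cases hk' : p.1 = k'
      · rw [List.find?_cons_of_pos (by simp [hk']), List.find?_cons_of_pos (by simp [hk'])]
      · rw [List.find?_cons_of_neg (by simp [hk']), List.find?_cons_of_neg (by simp [hk']), ih]

theorem pv_items_erase (d : PySem.Dict String Int) (k : String) :
    (d.erase k).items = d.items.filter (fun p => !(p.1 == k)) := rfl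

theorem pvPopLoop_eq (l : List (String × Int)) (d : PySem.Dict String Int)
    (hl : (l.map Prod.fst).Nodup) :
    pvPopLoop d l =
      if ∀ p ∈ l, d.getD p.1 0 = p.2
      then some ⟨d.items.filter (fun p => decide (p.1 ∉ l.map Prod.fst))⟩
      else none := by
  induction l generalizing d with
  | nil =>
    obtain ⟨items⟩ := d
    simp [pvPopLoop]
  | cons p rest ih =>
    obtain ⟨r, need⟩ := p
    simp only [List.map_cons, List.nodup_cons] at hl
    by_cases h : d.getD r 0 = need
    · have hrest : ∀ q ∈ rest, (d.erase r).getD q.1 0 = d.getD q.1 0 := by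
        intro q hq
        have hne : q.1 ≠ r := fun he => hl.1 (he ▸ List.mem_map.mpr ⟨q, hq, rfl⟩)
        simp [PySem.Dict.getD, pv_get?_erase_of_ne d hne]
      rw [show pvPopLoop d ((r, need) :: rest) = pvPopLoop (d.erase r) rest by
            simp [pvPopLoop, h],
          ih (d.erase r) hl.2]
      by_cases hall : ∀ q ∈ rest, d.getD q.1 0 = q.2
      · rw [if_pos (fun q hq => (hrest q hq).trans (hall q hq)),
            if_pos (by
              intro q hq
              rcases List.mem_cons.mp hq with rfl | hq'
              · exact h
              · exact hall q hq')]
        congr 1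
        congr 1
        rw [pv_items_erase, List.filter_filter]
        apply List.filter_congr
        intro q _
        by_cases hqr : q.1 = r
        · simp [hqr]
        · simp [hqr, Bool.and_comm]
      · rw [if_neg (fun hc => hall fun q hq => (hrest q hq).symm.trans (hc q hq)),
            if_neg (fun hc => hall fun q hq => hc q (List.mem_cons_of_mem _ hq))]
    · rw [show pvPopLoop d ((r, need) :: rest) = none by simp [pvPopLoop, h],
          if_neg (fun hc => h (hc (r, need) List.mem_cons_self))]

theorem pv_alt_iff (req alloc : List (String × Int))
    (h1 : (req.map Prod.fst).Nodup) :
    is_perfect_call_py_alt req alloc = true ↔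
      (∀ p ∈ req, (PySem.Dict.mk alloc).getD p.1 0 = p.2) ∧
      (∀ p ∈ alloc, p.1 ∉ req.map Prod.fst → p.2 ≤ 0) := by
  unfold is_perfect_call_py_alt
  rw [pvPopLoop_eq req (PySem.Dict.mk alloc) h1]
  by_cases hall : ∀ p ∈ req, (PySem.Dict.mk alloc).getD p.1 0 = p.2
  · rw [if_pos hall]
    show (List.map Prod.snd (List.filter _ alloc)).all _ = true ↔ _
    constructor
    · intro h
      refine ⟨hall, fun p hp hnm => ?_⟩
      have := List.all_eq_true.mp h p.2
        (List.mem_map.mpr ⟨p, List.mem_filter.mpr ⟨hp, decide_eq_true hnm⟩, rfl⟩)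
      exact of_decide_eq_true this
    · rintro ⟨-, h2⟩
      apply List.all_eq_true.mpr
      intro v hv
      obtain ⟨p, hpmem, rfl⟩ := List.mem_map.mp hv
      obtain ⟨hp, hnm⟩ := List.mem_filter.mp hpmem
      exact decide_eq_true (h2 p hp (of_decide_eq_true hnm))
  · rw [if_neg hall]
    constructor
    · intro h; exact absurd h (by simp)
    · intro h; exact absurd h.1 hall

theorem pv_main (req alloc : List (String × Int))
    (h1 : (req.map Prod.fst).Nodup) (h2 : (alloc.map Prod.fst).Nodup) :
    is_perfect_call_py req alloc = is_perfect_call_py_alt req alloc := by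
  rw [Bool.eq_iff_iff, pv_alt_iff req alloc h1]
  simp only [is_perfect_call_py, Bool.and_eq_true, pvReqLoop_iff, pvAllocLoop_iff]
  constructor
  · rintro ⟨hA1, hA2⟩
    refine ⟨hA1, fun p hp hnm => ?_⟩
    have hcf : (PySem.Dict.mk req).contains p.1 = false := by
      cases hc : (PySem.Dict.mk req).contains p.1
      · rfl
      · exact absurd ((pv_contains_mk req p.1).mp hc) hnm
    exact (hA2 p hp).1 hcf
  · rintro ⟨hB1, hB2⟩
    refine ⟨hB1, fun p hp => ⟨fun hcf => ?_, fun hct => ?_⟩⟩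
    · refine hB2 p hp (fun hm => ?_)
      rw [(pv_contains_mk req p.1).mpr hm] at hcf
      exact Bool.true_eq_false.mp hcf
    · obtain ⟨q, hq, hqf⟩ := List.mem_map.mp ((pv_contains_mk req p.1).mp hct)
      have hreqD : (PySem.Dict.mk req).getD p.1 0 = q.2 := by
        rw [← hqf]; exact pv_getD_mk req h1 hq
      have hallocD : (PySem.Dict.mk alloc).getD p.1 0 = p.2 := pv_getD_mk alloc h2 hp
      have := hB1 q hq
      rw [hqf, hallocD] at this
      omega

-- ===== VERDICT (by name: the statement is the Claim_ definition above) =====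
theorem is_perfect_call_py_spec : Claim_equal_is_perfect_call_py := by
  intro req alloc _ hpre
  unfold Spec_is_perfect_call_py
  exact pv_main req alloc hpre.1 hpre.2
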